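-- pv_equiv track=rewrite | github.com/gudrb4869/algorithm_repo | 프로그래머스/unrated/148653. 마법의 엘리베이터/마법의 엘리베이터.py | solution
-- ===== SOURCE A (Python) =====
-- def solution(storey):
--     answer = 0
--     n = storey
--
--     while n > 0:
--         cur = n % 10
--         nxt = (n // 10) % 10
--         rem = n // 100
--
--         if cur < 5:
--             answer += cur
--         elif cur > 5:
--             answer += 10 - cur
--             nxt += 1
--         else:
--             if nxt < 5:
--                 answer += cur
--             else:
--                 answer += 10 - cur
--                 nxt += 1
--
--         n = rem * 10 + nxt
--
--     return answer
-- ===== SOURCE B (Python) =====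
-- def solution(storey):
--     if storey <= 0:
--         return 0
--     if storey == 1:
--         return 1
--     d = storey % 10
--     return min(d + solution(storey // 10), (10 - d) + solution(storey // 10 + 1))
-- ===== Notes on version B (the rewrite author's own statement) =====
-- stated objective: simpler
-- what changed: Replaced the explicit while-loop with carry bookkeeping (cur/nxt/rem digit surgery and an if/elif chain for the tie digit) by a short recursion on the number with its last digit removed, taking min of pressing the last digit down or rounding up with a carry; min resolves the tie automatically.
import Mathlib
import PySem

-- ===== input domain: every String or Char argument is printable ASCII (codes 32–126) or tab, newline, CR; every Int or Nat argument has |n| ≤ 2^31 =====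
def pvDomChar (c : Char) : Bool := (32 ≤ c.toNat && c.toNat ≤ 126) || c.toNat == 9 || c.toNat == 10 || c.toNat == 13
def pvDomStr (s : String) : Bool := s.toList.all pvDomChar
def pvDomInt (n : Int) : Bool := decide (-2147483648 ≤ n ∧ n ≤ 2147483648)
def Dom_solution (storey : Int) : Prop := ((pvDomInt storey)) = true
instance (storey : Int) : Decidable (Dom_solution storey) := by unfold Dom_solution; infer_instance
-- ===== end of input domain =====

-- B replaces A's explicit while-loop carry bookkeeping by a short recursive digit
-- recurrence min(d + f(n//10), (10-d) + f(n//10+1)); objective: simpler.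


-- bridge lemmas (divisor is the literal 10/100, so Python floor division/mod is Int ediv/emod)
lemma fd10 (n : Int) : PySem.Int.floordiv n 10 = n / 10 :=
  PySem.Int.floordiv_eq_ediv_of_pos (by norm_num)

lemma fd100 (n : Int) : PySem.Int.floordiv n 100 = n / 100 :=
  PySem.Int.floordiv_eq_ediv_of_pos (by norm_num)

lemma md10 (n : Int) : PySem.Int.mod n 10 = n % 10 :=
  PySem.Int.mod_eq_emod_of_pos (by norm_num)

-- termination lemmas cited by name in the ports' decreasing_by
lemma pv_lt_down {n : Int} (h : 0 < n) :
    (PySem.Int.floordiv n 100 * 10 + PySem.Int.mod (PySem.Int.floordiv n 10) 10).toNat < n.toNat := by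
  rw [fd10, fd100, md10]; omega

lemma pv_lt_up {n : Int} (h : 0 < n) (h5 : ¬ PySem.Int.mod n 10 < 5) :
    (PySem.Int.floordiv n 100 * 10 + (PySem.Int.mod (PySem.Int.floordiv n 10) 10 + 1)).toNat
      < n.toNat := by
  rw [fd10, fd100, md10]; rw [md10] at h5; omega

lemma pv_alt_down {q : Int} (h0 : ¬ q ≤ 0) (_h1 : ¬ q = 1) :
    (PySem.Int.floordiv q 10).toNat < q.toNat := by
  rw [fd10]; omega

lemma pv_alt_up {q : Int} (h0 : ¬ q ≤ 0) (h1 : ¬ q = 1) :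
    (PySem.Int.floordiv q 10 + 1).toNat < q.toNat := by
  rw [fd10]; omega

-- ===== PORT A =====
-- A's while loop as a tail recursion over the same state (answer, n); the branch
-- order and the cur/nxt/rem arithmetic are A's, inlined.
def solutionGo (answer : Int) (n : Int) : Int :=
  if _hn : 0 < n then
    if _h1 : PySem.Int.mod n 10 < 5 then
      solutionGo (answer + PySem.Int.mod n 10)
        (PySem.Int.floordiv n 100 * 10 + PySem.Int.mod (PySem.Int.floordiv n 10) 10)
    else if _h2 : 5 < PySem.Int.mod n 10 then
      solutionGo (answer + (10 - PySem.Int.mod n 10))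
        (PySem.Int.floordiv n 100 * 10 + (PySem.Int.mod (PySem.Int.floordiv n 10) 10 + 1))
    else if _h3 : PySem.Int.mod (PySem.Int.floordiv n 10) 10 < 5 then
      solutionGo (answer + PySem.Int.mod n 10)
        (PySem.Int.floordiv n 100 * 10 + PySem.Int.mod (PySem.Int.floordiv n 10) 10)
    else
      solutionGo (answer + (10 - PySem.Int.mod n 10))
        (PySem.Int.floordiv n 100 * 10 + (PySem.Int.mod (PySem.Int.floordiv n 10) 10 + 1))
  else answer
termination_by n.toNat
decreasing_by
  · exact pv_lt_down _hn
  · exact pv_lt_up _hn _h1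
  · exact pv_lt_down _hn
  · exact pv_lt_up _hn _h1

def solution (storey : Int) : Int := solutionGo 0 storey

-- ===== PORT B =====
def solution_alt (storey : Int) : Int :=
  if _h0 : storey ≤ 0 then 0
  else if _h1 : storey = 1 then 1
  else
    min (PySem.Int.mod storey 10 + solution_alt (PySem.Int.floordiv storey 10))
        ((10 - PySem.Int.mod storey 10) + solution_alt (PySem.Int.floordiv storey 10 + 1))
termination_by storey.toNat
decreasing_by
  · exact pv_alt_down _h0 _h1
  · exact pv_alt_up _h0 _h1

-- ===== PRECONDITION & SPEC =====
def Spec_solution (storey : Int) (out : Int) : Prop := out = solution_alt storey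
instance (storey : Int) (out : Int) : Decidable (Spec_solution storey out) := by unfold Spec_solution; infer_instance

-- ===== CLAIM (what is proved, stated in full; the proofs are below) =====
def Claim_equal_solution : Prop := ∀ (storey : Int), Dom_solution storey → Spec_solution storey (solution storey)

-- ===== LEMMAS AND PROOFS =====

lemma go_nonpos (answer n : Int) (h : ¬ 0 < n) : solutionGo answer n = answer := by
  rw [solutionGo]; simp [h]

lemma go_step (answer n : Int) (h : 0 < n) :
    solutionGo answer n =
      if n % 10 < 5 then solutionGo (answer + n % 10) (n / 10)
      else if 5 < n % 10 then solutionGo (answer + (10 - n % 10)) (n / 10 + 1)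
      else if (n / 10) % 10 < 5 then solutionGo (answer + n % 10) (n / 10)
      else solutionGo (answer + (10 - n % 10)) (n / 10 + 1) := by
  conv_lhs => rw [solutionGo]
  simp only [fd10, fd100, md10, dif_pos h, dite_eq_ite]
  rw [show n / 100 * 10 + n / 10 % 10 = n / 10 from by omega]
  rw [show n / 100 * 10 + (n / 10 % 10 + 1) = n / 10 + 1 from by omega]

lemma alt_nonpos (q : Int) (h : q ≤ 0) : solution_alt q = 0 := by
  rw [solution_alt]; simp [h]

lemma alt_one : solution_alt 1 = 1 := by
  rw [solution_alt]; norm_num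

lemma alt_step (q : Int) (h : 2 ≤ q) :
    solution_alt q =
      min (q % 10 + solution_alt (q / 10)) ((10 - q % 10) + solution_alt (q / 10 + 1)) := by
  conv_lhs => rw [solution_alt]
  rw [dif_neg (by omega), dif_neg (by omega), fd10, md10]

lemma go_acc_aux : ∀ (k : Nat) (n : Int), n.toNat = k →
    ∀ answer : Int, solutionGo answer n = answer + solutionGo 0 n := by
  intro k
  induction k using Nat.strong_induction_on with
  | _ k IH =>
    intro n hk answer
    by_cases hn : 0 < n
    · rw [go_step answer n hn, go_step 0 n hn]
      split_ifs with h1 h2 h3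
      · rw [IH (n / 10).toNat (by omega) _ rfl, IH (n / 10).toNat (by omega) (n / 10) rfl (0 + n % 10)]
        ring
      · rw [IH (n / 10 + 1).toNat (by omega) _ rfl,
          IH (n / 10 + 1).toNat (by omega) (n / 10 + 1) rfl (0 + (10 - n % 10))]
        ring
      · rw [IH (n / 10).toNat (by omega) _ rfl, IH (n / 10).toNat (by omega) (n / 10) rfl (0 + n % 10)]
        ring
      · rw [IH (n / 10 + 1).toNat (by omega) _ rfl,
          IH (n / 10 + 1).toNat (by omega) (n / 10 + 1) rfl (0 + (10 - n % 10))]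
        ring
    · rw [go_nonpos answer n hn, go_nonpos 0 n hn]; ring

lemma go_acc (answer n : Int) : solutionGo answer n = answer + solutionGo 0 n :=
  go_acc_aux n.toNat n rfl answer

-- adjacent values of B differ by at most 1, with known direction given the last digit
lemma alt_adj_aux : ∀ (k : Nat) (q : Int), q.toNat = k → 0 ≤ q →
    (solution_alt q ≤ solution_alt (q + 1) + 1) ∧
    (solution_alt (q + 1) ≤ solution_alt q + 1) ∧
    (q % 10 < 5 → solution_alt q ≤ solution_alt (q + 1)) ∧
    (5 ≤ q % 10 → solution_alt (q + 1) ≤ solution_alt q) := by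
  intro k
  induction k using Nat.strong_induction_on with
  | _ k IH =>
    intro q hk hq
    by_cases h0 : q = 0
    · subst h0
      norm_num [alt_nonpos 0 le_rfl, alt_one]
    by_cases h1 : q = 1
    · subst h1
      have h2 : solution_alt 2 = 2 := by
        rw [alt_step 2 le_rfl]; norm_num [alt_nonpos 0 le_rfl, alt_one]
      norm_num [alt_one, h2]
    have hq2 : 2 ≤ q := by omega
    have ht := IH (q / 10).toNat (by omega) (q / 10) rfl (by omega)
    have ht1 := IH (q / 10 + 1).toNat (by omega) (q / 10 + 1) rfl (by omega)
    obtain ⟨ha1, ha2, -, -⟩ := ht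
    obtain ⟨hb1, hb2, -, -⟩ := ht1
    rw [alt_step q hq2, alt_step (q + 1) (by omega)]
    by_cases hd9 : q % 10 = 9
    · rw [show (q + 1) % 10 = 0 from by omega, show (q + 1) / 10 = q / 10 + 1 from by omega]
      refine ⟨?_, ?_, fun h => ?_, fun _ => ?_⟩ <;>
        · simp only [min_def]; split_ifs <;> omega
    · rw [show (q + 1) % 10 = q % 10 + 1 from by omega, show (q + 1) / 10 = q / 10 from by omega]
      refine ⟨?_, ?_, fun h => ?_, fun h => ?_⟩ <;>
        · simp only [min_def]; split_ifs <;> omega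

lemma main_aux : ∀ (k : Nat) (n : Int), n.toNat = k → solutionGo 0 n = solution_alt n := by
  intro k
  induction k using Nat.strong_induction_on with
  | _ k IH =>
    intro n hk
    by_cases hn : 0 < n
    · by_cases h1 : n = 1
      · subst h1
        rw [go_step 0 1 one_pos]
        norm_num [go_nonpos, alt_one]
      have hn2 : 2 ≤ n := by omega
      obtain ⟨ha1, ha2, ha3, ha4⟩ := alt_adj_aux (n / 10).toNat (n / 10) rfl (by omega)
      have e1 : solutionGo (0 + n % 10) (n / 10) = n % 10 + solution_alt (n / 10) := by
        rw [go_acc, IH (n / 10).toNat (by omega) (n / 10) rfl]; ring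
      have e2 : solutionGo (0 + (10 - n % 10)) (n / 10 + 1)
          = (10 - n % 10) + solution_alt (n / 10 + 1) := by
        rw [go_acc, IH (n / 10 + 1).toNat (by omega) (n / 10 + 1) rfl]; ring
      rw [go_step 0 n hn, alt_step n hn2]
      split_ifs with hc1 hc2 hc3
      · rw [e1]
        have := ha1
        simp only [min_def]; split_ifs <;> omega
      · rw [e2]
        have := ha2
        simp only [min_def]; split_ifs <;> omega
      · rw [e1]
        have := ha3 hc3
        simp only [min_def]; split_ifs <;> omega
      · rw [e2]
        have := ha4 (by omega)
        simp only [min_def]; split_ifs <;> omega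
    · rw [go_nonpos 0 n hn, alt_nonpos n (by omega)]

-- ===== VERDICT (by name: the statement is the Claim_ definition above) =====
theorem solution_spec : Claim_equal_solution := by
  intro storey _
  unfold Spec_solution solution
  exact main_aux storey.toNat storey rfl
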